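-- pv_equiv track=rewrite | github.com/xieyuanqing/WhisperLiveKit | scripts/auto_capture_analyze.py | count_hallucination_episodes
-- ===== SOURCE A (Python) =====
-- from typing import Any, Optional
--
-- def normalize_text(text: Any) -> str:
--     if text is None:
--         return ""
--     return " ".join(str(text).split()).strip()
--
-- def texts_related(lhs: str, rhs: str) -> bool:
--     if not lhs or not rhs:
--         return False
--     return lhs.startswith(rhs) or rhs.startswith(lhs)
--
-- def contains_suspect_phrase(text: str, suspect_phrases: list[str]) -> bool:
--     if not text:
--         return False
--     return any(phrase in text for phrase in suspect_phrases)
--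
-- def count_hallucination_episodes(events: list[dict[str, Any]], suspect_phrases: list[str]) -> int:
--     episodes = 0
--     previous_was_suspect = False
--     previous_text = ""
--
--     for event in events:
--         text = normalize_text(event.get("text", ""))
--         is_suspect = contains_suspect_phrase(text, suspect_phrases)
--         if not is_suspect:
--             previous_was_suspect = False
--             previous_text = text
--             continue
--
--         if not previous_was_suspect:
--             episodes += 1
--         elif not texts_related(previous_text, text):
--             episodes += 1
--
--         previous_was_suspect = True
--         previous_text = text
--
--     return episodes
-- ===== SOURCE B (Python) =====
-- def normalize_text(text):
--     if text is None:
--         return ""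
--     return " ".join(str(text).split()).strip()
--
-- def texts_related(lhs, rhs):
--     if not lhs or not rhs:
--         return False
--     return lhs.startswith(rhs) or rhs.startswith(lhs)
--
-- def contains_suspect_phrase(text, suspect_phrases):
--     if not text:
--         return False
--     return any(phrase in text for phrase in suspect_phrases)
--
-- def count_hallucination_episodes(events, suspect_phrases):
--     # Run-segmentation: split the (flag, text) stream into maximal runs of equal
--     # flag; each suspect run contributes 1 plus one for every adjacent pair of
--     # texts in the run that is not related.
--     pairs = [(contains_suspect_phrase(t, suspect_phrases), t)
--              for t in (normalize_text(e.get("text", "")) for e in events)]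
--     total = 0
--     i, n = 0, len(pairs)
--     while i < n:
--         flag, text = pairs[i]
--         j = i + 1
--         while j < n and pairs[j][0] == flag:
--             j += 1
--         if flag:
--             total += 1
--             prev = text
--             for k in range(i + 1, j):
--                 if not texts_related(prev, pairs[k][1]):
--                     total += 1
--                 prev = pairs[k][1]
--         i = j
--     return total
-- ===== Notes on version B (the rewrite author's own statement) =====
-- stated objective: alternative
-- what changed: Replaces A's single stateful loop carrying (previous_was_suspect, previous_text) by run segmentation: build the (is_suspect, normalized_text) stream, split it into maximal runs of equal flag, and let each suspect run contribute 1 plus the number of unrelated adjacent text pairs inside the run; non-suspect runs contribute nothing.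
import Mathlib
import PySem

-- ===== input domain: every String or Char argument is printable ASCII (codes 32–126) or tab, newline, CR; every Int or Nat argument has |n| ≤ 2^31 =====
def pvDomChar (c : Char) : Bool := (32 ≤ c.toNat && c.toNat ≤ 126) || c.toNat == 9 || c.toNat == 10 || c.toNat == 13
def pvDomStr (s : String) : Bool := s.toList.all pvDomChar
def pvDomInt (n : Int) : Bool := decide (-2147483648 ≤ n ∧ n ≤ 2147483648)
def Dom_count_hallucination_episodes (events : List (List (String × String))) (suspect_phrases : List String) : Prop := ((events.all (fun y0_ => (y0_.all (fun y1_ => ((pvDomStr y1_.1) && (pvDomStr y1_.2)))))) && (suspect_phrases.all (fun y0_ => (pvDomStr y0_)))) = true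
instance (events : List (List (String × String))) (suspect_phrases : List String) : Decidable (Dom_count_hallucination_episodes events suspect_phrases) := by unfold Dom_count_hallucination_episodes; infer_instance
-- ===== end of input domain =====

-- B replaces A's stateful loop (previous_was_suspect / previous_text) by run
-- segmentation of the (is_suspect, text) stream; objective: alternative.

-- ===== PORT A =====
-- shared module-level helpers of Source A (used verbatim by Source B as well)
def normalize_text (text : String) : String :=
  PySem.Str.strip (PySem.Str.join " " (PySem.Str.split₀ text))

def texts_related (lhs rhs : String) : Bool :=
  if lhs == "" || rhs == "" then false
  else PySem.Str.startswith lhs rhs || PySem.Str.startswith rhs lhs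

def contains_suspect_phrase (text : String) (suspect_phrases : List String) : Bool :=
  if text == "" then false
  else suspect_phrases.any (fun phrase => PySem.Str.isIn phrase text)

def count_hallucination_episodes (events : List (List (String × String))) (suspect_phrases : List String) : Int :=
  (events.foldl
    (fun (st : Int × Bool × String) event =>
      let text := normalize_text (PySem.Dict.getD (PySem.Dict.ofList event) "text" "")
      let is_suspect := contains_suspect_phrase text suspect_phrases
      if !is_suspect then
        (st.1, false, text)
      else
        let episodes :=
          if !st.2.1 then st.1 + 1
          else if !texts_related st.2.2 text then st.1 + 1
          else st.1
        (episodes, true, text))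
    (0, false, "")).1

-- ===== PORT B =====
-- Source B's inner `for k` loop: count unrelated adjacent text pairs within a run
def pvBreaks (prev : String) : List (Bool × String) → Int
  | [] => 0
  | q :: tl => (if !texts_related prev q.2 then 1 else 0) + pvBreaks q.2 tl

-- Source B's outer while loop: peel one maximal run of equal flag per step
def pvRunGo : List (Bool × String) → Int
  | [] => 0
  | p :: rest =>
    let s := rest.span (fun q => q.1 == p.1)
    (if p.1 then 1 + pvBreaks p.2 s.1 else 0) + pvRunGo s.2
termination_by l => l.length
decreasing_by
  simp only [List.span_eq_takeWhile_dropWhile]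
  exact Nat.lt_succ_of_le (List.length_dropWhile_le _ _)

def count_hallucination_episodes_alt (events : List (List (String × String))) (suspect_phrases : List String) : Int :=
  pvRunGo (events.map (fun e =>
    let t := normalize_text (PySem.Dict.getD (PySem.Dict.ofList e) "text" "")
    (contains_suspect_phrase t suspect_phrases, t)))

-- ===== PRECONDITION & SPEC =====
def Spec_count_hallucination_episodes (events : List (List (String × String))) (suspect_phrases : List String) (out : Int) : Prop := out = count_hallucination_episodes_alt events suspect_phrases
instance (events : List (List (String × String))) (suspect_phrases : List String) (out : Int) : Decidable (Spec_count_hallucination_episodes events suspect_phrases out) := by unfold Spec_count_hallucination_episodes; infer_instance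

-- ===== CLAIM (what is proved, stated in full; the proofs are below) =====
def Claim_equal_count_hallucination_episodes : Prop := ∀ (events : List (List (String × String))) (suspect_phrases : List String), Dom_count_hallucination_episodes events suspect_phrases → Spec_count_hallucination_episodes events suspect_phrases (count_hallucination_episodes events suspect_phrases)

-- ===== LEMMAS AND PROOFS =====

-- the per-event (flag, normalized text) pair both ports compute
def pvPair (suspect_phrases : List String) (e : List (String × String)) : Bool × String :=
  let t := normalize_text (PySem.Dict.getD (PySem.Dict.ofList e) "text" "")
  (contains_suspect_phrase t suspect_phrases, t)

-- common spec: A's episode count on the (flag, text) stream, prev as parameter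
def pvCnt (prev : Bool × String) : List (Bool × String) → Int
  | [] => 0
  | p :: rest => (if p.1 && (!prev.1 || !texts_related prev.2 p.2) then 1 else 0) + pvCnt p rest

theorem pvCnt_false_prev : ∀ (l : List (Bool × String)) (a b : String),
    pvCnt (false, a) l = pvCnt (false, b) l := by
  intro l a b
  cases l with
  | nil => rfl
  | cons p rest => simp [pvCnt]

theorem pvCnt_head_false : ∀ (l : List (Bool × String)) (a : Bool × String),
    (∀ q, l.head? = some q → q.1 = false) → pvCnt a l = pvCnt (false, "") l := by
  intro l a h
  cases l with
  | nil => rfl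
  | cons p rest =>
    have hp : p.1 = false := h p rfl
    simp [pvCnt, hp]

theorem pvCnt_false_run : ∀ (run rest : List (Bool × String)),
    (∀ q ∈ run, q.1 = false) → ∀ x,
    pvCnt (false, x) (run ++ rest) = pvCnt (false, "") rest := by
  intro run
  induction run with
  | nil => intro rest _ x; exact pvCnt_false_prev rest x ""
  | cons q tl ih =>
    intro rest h x
    have hq : q.1 = false := h q (List.mem_cons_self)
    obtain ⟨qb, qt⟩ := q
    subst hq
    simp only [List.cons_append, pvCnt, Bool.false_and, Bool.false_eq_true, if_false]
    rw [ih rest (fun r hr => h r (List.mem_cons_of_mem _ hr)) qt]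
    omega

theorem pvCnt_true_run : ∀ (run rest : List (Bool × String)) (t : String),
    (∀ q ∈ run, q.1 = true) → (∀ q, rest.head? = some q → q.1 = false) →
    pvCnt (true, t) (run ++ rest) = pvBreaks t run + pvCnt (false, "") rest := by
  intro run
  induction run with
  | nil =>
    intro rest t _ hh
    simp only [List.nil_append, pvBreaks]
    rw [pvCnt_head_false rest (true, t) hh]
    omega
  | cons q tl ih =>
    intro rest t h hh
    have hq : q.1 = true := h q (List.mem_cons_self)
    obtain ⟨qb, qt⟩ := q
    subst hq
    simp only [List.cons_append, pvCnt, pvBreaks, Bool.true_and, Bool.not_true, Bool.false_or]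
    rw [ih rest qt (fun r hr => h r (List.mem_cons_of_mem _ hr)) hh]
    omega

-- helper: the head of dropWhile fails the predicate
theorem pv_head_dropWhile : ∀ (p : Bool × String → Bool) (l : List (Bool × String)) (q : Bool × String),
    (l.dropWhile p).head? = some q → p q = false := by
  intro p l
  induction l with
  | nil => intro q h; simp at h
  | cons x tl ih =>
    intro q h
    by_cases hx : p x = true
    · rw [List.dropWhile_cons, if_pos hx] at h
      exact ih q h
    · rw [List.dropWhile_cons, if_neg hx] at h
      simp at h
      subst h
      exact Bool.not_eq_true _ ▸ (by simpa using hx)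

theorem pvRunGo_eq_cnt : ∀ (n : Nat) (l : List (Bool × String)), l.length ≤ n →
    pvRunGo l = pvCnt (false, "") l := by
  intro n
  induction n with
  | zero =>
    intro l hl
    have : l = [] := List.eq_nil_of_length_eq_zero (Nat.le_zero.mp hl)
    subst this; rw [pvRunGo]; rfl
  | succ n ih =>
    intro l hl
    cases l with
    | nil => rw [pvRunGo]; rfl
    | cons p rest =>
      rw [pvRunGo]
      simp only [List.span_eq_takeWhile_dropWhile]
      have hsplit : rest = rest.takeWhile (fun q => q.1 == p.1) ++ rest.dropWhile (fun q => q.1 == p.1) :=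
        (List.takeWhile_append_dropWhile).symm
      have hlen : (rest.dropWhile (fun q => q.1 == p.1)).length ≤ n := by
        have := List.length_dropWhile_le (fun q => q.1 == p.1) rest
        simp only [List.length_cons] at hl
        omega
      have hrec := ih (rest.dropWhile (fun q => q.1 == p.1)) hlen
      have hhead : ∀ q, (rest.dropWhile (fun q => q.1 == p.1)).head? = some q → (q.1 == p.1) = false :=
        fun q hq => pv_head_dropWhile _ rest q hq
      obtain ⟨pb, pt⟩ := p
      cases pb with
      | false =>
        simp only [Bool.false_eq_true, if_false]
        rw [hrec]
        conv_rhs => rw [pvCnt, hsplit]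
        have hall : ∀ q ∈ rest.takeWhile (fun q => q.1 == (false, pt).1), q.1 = false := by
          intro q hq
          have := List.mem_takeWhile_imp hq
          simpa using this
        rw [pvCnt_false_run _ _ hall pt]
        simp
      | true =>
        simp only [if_true]
        rw [hrec]
        conv_rhs => rw [pvCnt, hsplit]
        have hall : ∀ q ∈ rest.takeWhile (fun q => q.1 == (true, pt).1), q.1 = true := by
          intro q hq
          have := List.mem_takeWhile_imp hq
          simpa using this
        have hh : ∀ q, (rest.dropWhile (fun q => q.1 == (true, pt).1)).head? = some q → q.1 = false := by
          intro q hq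
          have := hhead q hq
          simpa using this
        rw [pvCnt_true_run _ _ pt hall hh]
        simp only [Bool.true_and, Bool.not_false, Bool.true_or, if_true]
        omega

theorem pvA_eq_cnt (suspect_phrases : List String) :
    ∀ (events : List (List (String × String))) (ep : Int) (pf : Bool) (pt : String),
      (events.foldl
        (fun (st : Int × Bool × String) event =>
          let text := normalize_text (PySem.Dict.getD (PySem.Dict.ofList event) "text" "")
          let is_suspect := contains_suspect_phrase text suspect_phrases
          if !is_suspect then
            (st.1, false, text)
          else
            let episodes :=
              if !st.2.1 then st.1 + 1
              else if !texts_related st.2.2 text then st.1 + 1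
              else st.1
            (episodes, true, text))
        (ep, pf, pt)).1
      = ep + pvCnt (pf, pt) (events.map (pvPair suspect_phrases)) := by
  intro events
  induction events with
  | nil => intro ep pf pt; simp [pvCnt]
  | cons e rest ih =>
    intro ep pf pt
    rw [List.map_cons, List.foldl_cons]
    show (List.foldl _ (if !contains_suspect_phrase (normalize_text (PySem.Dict.getD (PySem.Dict.ofList e) "text" "")) suspect_phrases then
            ((ep, pf, pt).1, false, normalize_text (PySem.Dict.getD (PySem.Dict.ofList e) "text" ""))
          else
            ((if !pf then ep + 1
              else if !texts_related pt (normalize_text (PySem.Dict.getD (PySem.Dict.ofList e) "text" "")) then ep + 1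
              else ep), true, normalize_text (PySem.Dict.getD (PySem.Dict.ofList e) "text" ""))) rest).1 = _
    cases hs : contains_suspect_phrase (normalize_text (PySem.Dict.getD (PySem.Dict.ofList e) "text" "")) suspect_phrases with
    | false =>
      simp only [Bool.not_false, if_true, pvCnt, pvPair, hs, Bool.false_and, Bool.false_eq_true, if_false]
      rw [ih]
      omega
    | true =>
      simp only [Bool.not_true, Bool.false_eq_true, if_false, pvCnt, pvPair, hs, Bool.true_and]
      cases hp : pf with
      | false =>
        simp only [Bool.not_false, if_true, Bool.true_or]
        rw [ih]
        omega
      | true =>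
        simp only [Bool.not_true, Bool.false_eq_true, if_false, Bool.false_or]
        cases hr : texts_related pt (normalize_text (PySem.Dict.getD (PySem.Dict.ofList e) "text" "")) with
        | false =>
          simp only [Bool.not_false, if_true]
          rw [ih]
          omega
        | true =>
          simp only [Bool.not_true, Bool.false_eq_true, if_false]
          rw [ih]
          omega

-- ===== VERDICT (by name: the statement is the Claim_ definition above) =====
theorem count_hallucination_episodes_spec : Claim_equal_count_hallucination_episodes := by
  intro events suspect_phrases _
  unfold Spec_count_hallucination_episodes count_hallucination_episodes count_hallucination_episodes_alt
  rw [pvA_eq_cnt suspect_phrases events 0 false ""]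
  rw [show (events.map (fun e =>
      let t := normalize_text (PySem.Dict.getD (PySem.Dict.ofList e) "text" "")
      (contains_suspect_phrase t suspect_phrases, t))) = events.map (pvPair suspect_phrases) from rfl]
  rw [pvRunGo_eq_cnt (events.map (pvPair suspect_phrases)).length _ (le_refl _)]
  omega
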